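-- pv_equiv track=rewrite | github.com/smertzani444/GEO-PMP | external/tubiana_etal_2022/trunk/pepr2ds/builder/Structure.py | define_SS_segment
-- ===== SOURCE A (Python) =====
-- def define_SS_segment(ssAtom):
--     """
--     Define continuous secondary structure segment segment
--     Idea:
--     CCCCHHHHCCEEEEHHHHHEEECCCCC
--      C1  H1 C2 E1  H2   E2  C3
--
--     NOTE: this can be modified to improve the coding of the SS segment
--     Args:
--         ssAtom (str): string of SS sequence (for every amino acids)
--     Returns:
--         SSegments (list): list of secondary structure segment.
--     """
--     SSelements = list(set(ssAtom))
--     SScount = {x: 0 for x in SSelements}  # Counter for every amino acid type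
--
--     # instanciate first element
--     SSsegments = []
--     for i in range(len(ssAtom)):
--         # check if the segment change
--         currentSS = ssAtom[i]
--         if i == 0:  # increment the first element since we start with 0
--             SScount[currentSS] += 1
--         else:
--             if currentSS != ssAtom[i - 1]:  # segment change
--                 SScount[currentSS] += 1  # increment segment index
--         SSsegments.append(f"{currentSS}{SScount[currentSS]}")
--
--     return SSsegments
-- ===== SOURCE B (Python) =====
-- def define_SS_segment(ssAtom):
--     counts = {}
--     out = []
--     i, n = 0, len(ssAtom)
--     while i < n:
--         ch = ssAtom[i]
--         j = i + 1
--         while j < n and ssAtom[j] == ch: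
--             j += 1
--         counts[ch] = counts.get(ch, 0) + 1
--         out.extend([f"{ch}{counts[ch]}"] * (j - i))
--         i = j
--     return out
-- ===== Notes on version B (the rewrite author's own statement) =====
-- stated objective: alternative
-- what changed: Replaces the per-position previous-character comparison loop (with a dict pre-seeded to zero from set(ssAtom)) by a run-oriented scan: each maximal run of identical characters is found with an inner scan, its counter bumped once via dict.get default, and the label replicated over the run length.
import Mathlib
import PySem

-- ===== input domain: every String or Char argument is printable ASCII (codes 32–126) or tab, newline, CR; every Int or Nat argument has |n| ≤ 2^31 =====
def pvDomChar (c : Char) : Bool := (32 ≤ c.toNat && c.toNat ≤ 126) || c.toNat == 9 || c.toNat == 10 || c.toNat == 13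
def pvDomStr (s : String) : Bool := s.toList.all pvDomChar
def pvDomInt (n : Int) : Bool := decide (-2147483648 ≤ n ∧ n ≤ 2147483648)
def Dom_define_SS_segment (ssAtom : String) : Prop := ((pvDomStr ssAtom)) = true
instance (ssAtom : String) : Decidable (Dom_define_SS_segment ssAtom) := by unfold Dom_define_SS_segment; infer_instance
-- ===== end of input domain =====

-- B replaces A's per-position previous-character comparison by a run-oriented scan
-- (find each maximal run, bump that character's counter once, replicate the label);
-- objective: alternative decomposition, same output.

-- ===== PORT A =====
-- f"{c}{n}"
def pvLabel (c : Char) (n : Int) : String := String.ofList (c :: PySem.Int.toChars n)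

-- body of A's for-loop over i in range(len(ssAtom)); key lookups can never raise
-- KeyError (every character of ssAtom is a key of SScount), so getD/modify with
-- default 0 is exact
def pvStepA (cs : List Char) (st : PySem.Dict Char Int × List String) (i : Int) :
    PySem.Dict Char Int × List String :=
  let currentSS := PySem.List.pyGetD cs i ' '
  let d :=
    if i == 0 then PySem.Dict.modify st.1 currentSS 0 (· + 1)
    else if currentSS != PySem.List.pyGetD cs (i - 1) ' ' then
      PySem.Dict.modify st.1 currentSS 0 (· + 1)
    else st.1
  (d, st.2 ++ [pvLabel currentSS (PySem.Dict.getD d currentSS 0)])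

def define_SS_segment (ssAtom : String) : List String :=
  let cs := ssAtom.toList
  let SSelements : PySem.Set Char := PySem.Set.ofList cs
  -- {x: 0 for x in SSelements}; the dict is only looked up afterwards, so the
  -- set's iteration order cannot influence the result
  let SScount := SSelements.foldl (fun d x => PySem.Dict.insert d x (0 : Int)) PySem.Dict.empty
  ((PySem.List.pyRange 0 (PySem.List.len cs) 1).foldl (pvStepA cs)
    (SScount, ([] : List String))).2

-- ===== PORT B =====
-- outer while: one step per maximal run; the inner 'while j < n and ssAtom[j] == ch'
-- is the takeWhile/dropWhile split of the remainder
def pvRunLoop (cs : List Char) (counts : PySem.Dict Char Int) : List String :=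
  match cs with
  | [] => []
  | c :: rest =>
    let run := rest.takeWhile (· == c)
    let tail := rest.dropWhile (· == c)
    let n := PySem.Dict.getD counts c 0 + 1
    List.replicate (run.length + 1) (pvLabel c n) ++
      pvRunLoop tail (PySem.Dict.insert counts c n)
termination_by cs.length
decreasing_by
  have := List.length_dropWhile_le (fun x => x == c) rest
  simp only [List.length_cons]
  omega

def define_SS_segment_alt (ssAtom : String) : List String :=
  pvRunLoop ssAtom.toList PySem.Dict.empty

-- ===== PRECONDITION & SPEC =====
def Spec_define_SS_segment (ssAtom : String) (out : List String) : Prop := out = define_SS_segment_alt ssAtom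
instance (ssAtom : String) (out : List String) : Decidable (Spec_define_SS_segment ssAtom out) := by unfold Spec_define_SS_segment; infer_instance

-- ===== CLAIM (what is proved, stated in full; the proofs are below) =====
def Claim_equal_define_SS_segment : Prop := ∀ (ssAtom : String), Dom_define_SS_segment ssAtom → Spec_define_SS_segment ssAtom (define_SS_segment ssAtom)

-- ===== LEMMAS AND PROOFS =====

-- reference form of A's loop: each position paired with the previous character
-- (none for the first)
def pvQ (prev : Option Char) : List Char → List (Char × Option Char)
  | [] => []
  | c :: rest => (c, prev) :: pvQ (some c) rest

-- A's step re-expressed on (current, previous) pairs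
def pvStep2 (st : PySem.Dict Char Int × List String) (p : Char × Option Char) :
    PySem.Dict Char Int × List String :=
  let d := if p.2 == some p.1 then st.1 else PySem.Dict.modify st.1 p.1 0 (· + 1)
  (d, st.2 ++ [pvLabel p.1 (PySem.Dict.getD d p.1 0)])

-- last previous-character marker after the positions of cs, starting from prev
def pvLastOpt (prev : Option Char) (cs : List Char) : Option Char :=
  match cs.getLast? with
  | some x => some x
  | none => prev

lemma pvQ_snoc (cs : List Char) (c : Char) (prev : Option Char) :
    pvQ prev (cs ++ [c]) = pvQ prev cs ++ [(c, pvLastOpt prev cs)] := by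
  induction cs generalizing prev with
  | nil => simp [pvQ, pvLastOpt]
  | cons a l ih =>
    simp only [List.cons_append, pvQ, ih (some a), pvLastOpt]
    cases h : l.getLast? with
    | none =>
      have : l = [] := by
        cases l with
        | nil => rfl
        | cons b t => simp [List.getLast?_eq_getLast] at h
      subst this; simp [pvLastOpt]
    | some x => simp [pvLastOpt, h, List.getLast?_cons, h]

lemma pvStepA_eq_step2 (cs : List Char) (c : Char) (st : PySem.Dict Char Int × List String) :
    pvStepA (cs ++ [c]) st (cs.length : Int) = pvStep2 st (c, pvLastOpt none cs) := by
  have hcur : PySem.List.pyGetD (cs ++ [c]) (cs.length : Int) ' ' = c := by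
    rw [PySem.List.pyGetD_natCast]
    simp [List.getD]
  cases cs with
  | nil =>
    simp [pvStepA, pvStep2, pvLastOpt, hcur]
  | cons a l =>
    have hne : ((((a :: l).length : Int)) == 0) = false := by
      simp [List.length_cons]; omega
    have hprev : PySem.List.pyGetD ((a :: l) ++ [c]) (((a :: l).length : Int) - 1) ' '
        = (a :: l).getLast (by simp) := by
      have h1 : (((a :: l).length : Int) - 1) = ((l.length : Nat) : Int) := by
        simp only [List.length_cons]; push_cast; ring
      rw [h1, PySem.List.pyGetD_natCast, List.getLast_eq_getElem,
        List.getD_eq_getElem?_getD, List.getElem?_append_left (by simp),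
        List.getElem?_eq_getElem (by simp)]
      simp only [Option.getD_some]
      simp
      rfl
    have hlast : pvLastOpt none (a :: l) = some ((a :: l).getLast (by simp)) := by
      simp [pvLastOpt, List.getLast?_eq_some_getLast]
    simp only [pvStepA, pvStep2, hcur, hne, hprev, hlast]
    set g := (a :: l).getLast (by simp) with hg
    by_cases h : c = g
    · subst h
      simp
    · have h2 : (c != g) = true := by simp [h]
      have h3 : (some g == some c) = false := by simp [bne] at h2 ⊢; exact fun hh => h hh.symm
      simp [h2, h3]

lemma pvFoldA_eq_foldQ (cs : List Char) (st : PySem.Dict Char Int × List String) :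
    (PySem.List.pyRange 0 ((cs.length : Nat) : Int) 1).foldl (pvStepA cs) st
      = (pvQ none cs).foldl pvStep2 st := by
  induction cs using List.reverseRecOn generalizing st with
  | nil => rfl
  | append_singleton l c ih =>
    have hlen : ((l ++ [c]).length : Int) = (l.length : Int) + 1 := by simp
    rw [hlen, PySem.List.pyRange_one_succ_right (by positivity), List.foldl_append]
    rw [pvQ_snoc, List.foldl_append]
    have hagree : (PySem.List.pyRange 0 ((l.length : Nat) : Int) 1).foldl (pvStepA (l ++ [c])) st
        = (PySem.List.pyRange 0 ((l.length : Nat) : Int) 1).foldl (pvStepA l) st := by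
      apply PySem.List.foldl_congr_mem
      intro acc i hi
      rw [PySem.List.mem_pyRange_one] at hi
      obtain ⟨h0, hlt⟩ := hi
      have hgetd : ∀ (j : Int), 0 ≤ j → j < (l.length : Int) →
          PySem.List.pyGetD (l ++ [c]) j ' ' = PySem.List.pyGetD l j ' ' := by
        intro j hj0 hjlt
        rw [PySem.List.pyGetD_eq_getElem _ _ hj0 (by first | (simp [PySem.List.len_eq]; omega) | omega | (push_cast; omega)),
            PySem.List.pyGetD_eq_getElem _ _ hj0 (by first | (simp [PySem.List.len_eq]; omega) | omega | (push_cast; omega))]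
        exact List.getElem_append_left (by omega)
      unfold pvStepA
      by_cases hz : i = 0
      · subst hz; simp [hgetd 0 le_rfl (by omega)]
      · have hne : ((i : Int) == 0) = false := by simp [hz]
        simp only [hne, if_false, Bool.false_eq_true]
        rw [hgetd i h0 hlt, hgetd (i - 1) (by omega) (by omega)]
    rw [hagree, ih]
    simp only [List.foldl_cons, List.foldl_nil]
    exact pvStepA_eq_step2 l c _
-- reference recursion equivalent to folding pvStep2 over pvQ
def pvRefA : List Char → Option Char → PySem.Dict Char Int → PySem.Dict Char Int × List String
  | [], _, d => (d, [])
  | c :: rest, prev, d =>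
    let d' := if prev == some c then d else PySem.Dict.modify d c 0 (· + 1)
    let r := pvRefA rest (some c) d'
    (r.1, pvLabel c (PySem.Dict.getD d' c 0) :: r.2)

lemma pvFoldQ_eq_refA (cs : List Char) (prev : Option Char)
    (d : PySem.Dict Char Int) (out : List String) :
    (pvQ prev cs).foldl pvStep2 (d, out)
      = ((pvRefA cs prev d).1, out ++ (pvRefA cs prev d).2) := by
  induction cs generalizing prev d out with
  | nil => simp [pvQ, pvRefA]
  | cons c rest ih =>
    simp only [pvQ, List.foldl_cons, pvStep2, pvRefA]
    rw [ih]
    simp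

lemma pvRefA_const_run (xs : List Char) (c : Char) (tail : List Char)
    (d : PySem.Dict Char Int) (h : ∀ x ∈ xs, x = c) :
    pvRefA (xs ++ tail) (some c) d
      = ((pvRefA tail (some c) d).1,
         List.replicate xs.length (pvLabel c (PySem.Dict.getD d c 0))
           ++ (pvRefA tail (some c) d).2) := by
  induction xs with
  | nil => simp
  | cons x l ih =>
    have hx : x = c := h x (by simp)
    subst hx
    simp only [List.cons_append, pvRefA, BEq.refl, Option.some.injEq, beq_self_eq_true,
      if_true, if_pos rfl]
    rw [ih (fun y hy => h y (by simp [hy]))]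
    simp [List.replicate_succ]

lemma pvHead_dropWhile_false (p : Char → Bool) (l : List Char) (x : Char)
    (h : (l.dropWhile p).head? = some x) : p x = false := by
  induction l with
  | nil => simp [List.dropWhile] at h
  | cons a t ih =>
    rw [List.dropWhile_cons] at h
    by_cases hp : p a
    · simp [hp] at h; exact ih h
    · simp [hp] at h; subst h; simpa using hp

lemma pvRefA_eq_runLoop : ∀ (n : Nat) (cs : List Char) (prev : Option Char)
    (d counts : PySem.Dict Char Int), cs.length ≤ n →
    (∀ k, PySem.Dict.getD d k 0 = PySem.Dict.getD counts k 0) →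
    (∀ c, cs.head? = some c → prev ≠ some c) →
    (pvRefA cs prev d).2 = pvRunLoop cs counts := by
  intro n
  induction n with
  | zero =>
    intro cs prev d counts hlen _ _
    have : cs = [] := by cases cs <;> simp_all
    subst this; rw [pvRunLoop.eq_def]; simp [pvRefA]
  | succ m ih =>
    intro cs prev d counts hlen hinv hhead
    cases cs with
    | nil => rw [pvRunLoop.eq_def]; simp [pvRefA]
    | cons c rest =>
      have hprev : (prev == some c) = false := by
        have := hhead c (by simp)
        simp [this]
      have hsplit : rest.takeWhile (· == c) ++ rest.dropWhile (· == c) = rest :=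
        List.takeWhile_append_dropWhile
      rw [pvRunLoop.eq_def]
      simp only
      set run := rest.takeWhile (· == c) with hrun
      set tail := rest.dropWhile (· == c) with htail
      have hrefa : pvRefA (c :: rest) prev d
          = (let d' := PySem.Dict.modify d c 0 (· + 1)
             let r := pvRefA rest (some c) d'
             (r.1, pvLabel c (PySem.Dict.getD d' c 0) :: r.2)) := by
        simp [pvRefA, hprev]
      rw [hrefa]
      simp only
      have hrest : rest = run ++ tail := hsplit.symm
      have hall : ∀ x ∈ run, x = c := by
        intro x hx
        have := List.mem_takeWhile_imp hx
        simpa using this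
      rw [hrest, pvRefA_const_run run c tail _ hall]
      simp only
      have hv : PySem.Dict.getD (PySem.Dict.modify d c 0 (· + 1)) c 0
          = PySem.Dict.getD counts c 0 + 1 := by
        rw [PySem.Dict.getD_modify_self, hinv c]
      have hrec : (pvRefA tail (some c) (PySem.Dict.modify d c 0 (· + 1))).2
          = pvRunLoop tail (PySem.Dict.insert counts c (PySem.Dict.getD counts c 0 + 1)) := by
        apply ih tail (some c) _ _
        · have h1 : tail.length ≤ rest.length := List.length_dropWhile_le _ _
          have h2 : rest.length + 1 ≤ m + 1 := by simpa using hlen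
          omega
        · intro k
          rw [PySem.Dict.getD_modify, PySem.Dict.getD_insert]
          split_ifs with hk
          · subst hk; rw [hinv k]
          · exact hinv k
        · intro x hx hcontra
          have hfalse : (x == c) = false := pvHead_dropWhile_false _ rest x hx
          simp at hcontra
          subst hcontra
          simp at hfalse
      rw [hrec, hv]
      simp [List.replicate_succ]

lemma pvSeedZero (es : List Char) (d : PySem.Dict Char Int)
    (h : ∀ k, PySem.Dict.getD d k 0 = 0) :
    ∀ k, PySem.Dict.getD (es.foldl (fun d x => PySem.Dict.insert d x (0 : Int)) d) k 0 = 0 := by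
  induction es generalizing d with
  | nil => simpa using h
  | cons e l ih =>
    intro k
    apply ih
    intro k'
    rw [PySem.Dict.getD_insert]
    split_ifs with hk
    · rfl
    · exact h k'

-- ===== VERDICT (by name: the statement is the Claim_ definition above) =====
theorem define_SS_segment_spec : Claim_equal_define_SS_segment := by
  intro ssAtom _
  unfold Spec_define_SS_segment define_SS_segment define_SS_segment_alt
  simp only
  set cs := ssAtom.toList
  set d0 := (PySem.Set.ofList cs).foldl (fun d x => PySem.Dict.insert d x (0 : Int))
    PySem.Dict.empty with hd0
  rw [PySem.List.len_eq, pvFoldA_eq_foldQ, pvFoldQ_eq_refA]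
  simp only [List.nil_append]
  apply pvRefA_eq_runLoop cs.length cs none d0 PySem.Dict.empty le_rfl
  · intro k
    rw [pvSeedZero _ PySem.Dict.empty (fun k => by rw [PySem.Dict.getD_empty]) k,
        PySem.Dict.getD_empty]
  · intro c _ h
    simp at h
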